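-- pv_equiv track=rewrite | github.com/Otmane-Briach/pruebas_tfm | collector.py | decode_chmod_mode
-- ===== SOURCE A (Python) =====
-- def decode_chmod_mode(mode):
--     """Decodificar permisos chmod"""
--     octal = oct(mode & 0o777)
--
--     perms = []
--     if mode & 0o4000: perms.append("SETUID")
--     if mode & 0o2000: perms.append("SETGID")
--     if mode & 0o1000: perms.append("STICKY")
--
--     symbolic = ""
--     for shift in [6, 3, 0]:
--         p = (mode >> shift) & 0o7
--         symbolic += "r" if p & 0o4 else "-"
--         symbolic += "w" if p & 0o2 else "-"
--         symbolic += "x" if p & 0o1 else "-"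
--
--     result = f"{octal} ({symbolic})"
--     if perms:
--         result += f" [{','.join(perms)}]"
--
--     return result
-- ===== SOURCE B (Python) =====
-- PERM = ["---", "--x", "-w-", "-wx", "r--", "r-x", "rw-", "rwx"]
--
-- def decode_chmod_mode(mode):
--     """Decodificar permisos chmod (table-driven symbolic part)"""
--     octal = oct(mode & 0o777)
--
--     perms = []
--     if mode & 0o4000: perms.append("SETUID")
--     if mode & 0o2000: perms.append("SETGID")
--     if mode & 0o1000: perms.append("STICKY")
--
--     symbolic = PERM[(mode >> 6) & 7] + PERM[(mode >> 3) & 7] + PERM[mode & 7]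
--
--     result = f"{octal} ({symbolic})"
--     if perms:
--         result += f" [{','.join(perms)}]"
--
--     return result
-- ===== Notes on version B (the rewrite author's own statement) =====
-- stated objective: simpler
-- what changed: The symbolic-permission loop that tests the r/w/x bits of each octal digit is replaced by indexing a precomputed eight-entry table PERM with each digit value; octal string, special-bit list and final assembly are unchanged.
import Mathlib
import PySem

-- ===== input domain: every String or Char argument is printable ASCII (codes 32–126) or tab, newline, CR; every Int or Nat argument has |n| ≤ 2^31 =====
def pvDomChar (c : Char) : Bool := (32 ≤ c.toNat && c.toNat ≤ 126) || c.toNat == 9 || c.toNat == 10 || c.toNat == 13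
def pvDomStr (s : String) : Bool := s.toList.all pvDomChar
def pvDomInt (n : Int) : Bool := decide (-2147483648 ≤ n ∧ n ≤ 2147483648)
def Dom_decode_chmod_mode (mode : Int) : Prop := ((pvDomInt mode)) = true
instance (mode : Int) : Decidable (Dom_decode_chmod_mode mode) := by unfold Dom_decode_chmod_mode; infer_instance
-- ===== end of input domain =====

-- B replaces A's per-bit r/w/x test loop by indexing a precomputed 8-entry permission table (objective: simpler).

-- ===== PORT A =====
-- shared helper (both Pythons call the builtin oct): octal digits of a Nat, MSD first
def pyOctDigits (n : Nat) : List Char :=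
  if h : n < 8 then [Char.ofNat (48 + n)]
  else pyOctDigits (n / 8) ++ [Char.ofNat (48 + n % 8)]
  decreasing_by exact Nat.div_lt_self (by omega) (by omega)

-- oct(n), exact for every Int (Python prefixes '-' for negatives)
def pyOct (n : Int) : String :=
  if n < 0 then "-0o" ++ String.ofList (pyOctDigits n.natAbs) else "0o" ++ String.ofList (pyOctDigits n.toNat)

def decode_chmod_mode (mode : Int) : String :=
  let octal := pyOct (PySem.Int.band mode 511)
  let perms : List String := []
  let perms := if PySem.Int.band mode 2048 ≠ 0 then perms ++ ["SETUID"] else perms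
  let perms := if PySem.Int.band mode 1024 ≠ 0 then perms ++ ["SETGID"] else perms
  let perms := if PySem.Int.band mode 512 ≠ 0 then perms ++ ["STICKY"] else perms
  let symbolic := ([6, 3, 0] : List Nat).foldl (fun acc (shift : Nat) =>
    let p := PySem.Int.band (mode >>> shift) 7
    ((acc ++ (if PySem.Int.band p 4 ≠ 0 then "r" else "-"))
        ++ (if PySem.Int.band p 2 ≠ 0 then "w" else "-"))
        ++ (if PySem.Int.band p 1 ≠ 0 then "x" else "-")) ""
  let result := octal ++ " (" ++ symbolic ++ ")"
  let result := if perms ≠ [] then result ++ " [" ++ PySem.Str.join "," perms ++ "]" else result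
  result

-- ===== PORT B =====
def PERM : List String := ["---", "--x", "-w-", "-wx", "r--", "r-x", "rw-", "rwx"]

-- PERM[i]; the .getD default is unreachable (the index is always a value & 7, hence in [0, 8))
def permGet (i : Int) : String := (PySem.List.pyGet? PERM i).getD ""

def decode_chmod_mode_alt (mode : Int) : String :=
  let octal := pyOct (PySem.Int.band mode 511)
  let perms : List String := []
  let perms := if PySem.Int.band mode 2048 ≠ 0 then perms ++ ["SETUID"] else perms
  let perms := if PySem.Int.band mode 1024 ≠ 0 then perms ++ ["SETGID"] else perms
  let perms := if PySem.Int.band mode 512 ≠ 0 then perms ++ ["STICKY"] else perms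
  let symbolic := permGet (PySem.Int.band (mode >>> (6 : Nat)) 7)
      ++ permGet (PySem.Int.band (mode >>> (3 : Nat)) 7)
      ++ permGet (PySem.Int.band mode 7)
  let result := octal ++ " (" ++ symbolic ++ ")"
  let result := if perms ≠ [] then result ++ " [" ++ PySem.Str.join "," perms ++ "]" else result
  result

-- ===== PRECONDITION & SPEC =====
def Spec_decode_chmod_mode (mode : Int) (out : String) : Prop := out = decode_chmod_mode_alt mode
instance (mode : Int) (out : String) : Decidable (Spec_decode_chmod_mode mode out) := by unfold Spec_decode_chmod_mode; infer_instance

-- ===== CLAIM (what is proved, stated in full; the proofs are below) =====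
def Claim_equal_decode_chmod_mode : Prop := ∀ (mode : Int), Dom_decode_chmod_mode mode → Spec_decode_chmod_mode mode (decode_chmod_mode mode)

-- ===== LEMMAS AND PROOFS =====

-- x & 7 always lands in [0, 8)
theorem band7_bounds (x : Int) : 0 ≤ PySem.Int.band x 7 ∧ PySem.Int.band x 7 < 8 := by
  unfold PySem.Int.band
  have h1 := Nat.and_le_right (n := x.toNat) (m := (7 : Int).toNat)
  have h2 := Nat.and_le_left (n := (7 : Int).toNat) (m := (-x - 1).toNat)
  split_ifs <;> omega

-- A's three bit-tests on p = x & 7 append exactly the table entry PERM[p]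
theorem triad_eq (acc : String) (x : Int) :
    (((acc ++ (if PySem.Int.band (PySem.Int.band x 7) 4 ≠ 0 then "r" else "-"))
        ++ (if PySem.Int.band (PySem.Int.band x 7) 2 ≠ 0 then "w" else "-"))
        ++ (if PySem.Int.band (PySem.Int.band x 7) 1 ≠ 0 then "x" else "-"))
      = acc ++ permGet (PySem.Int.band x 7) := by
  obtain ⟨h0, h8⟩ := band7_bounds x
  set p := PySem.Int.band x 7 with hp
  clear_value p
  interval_cases p <;> (simp only [String.append_assoc]; congr 1)

-- ===== VERDICT (by name: the statement is the Claim_ definition above) =====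
theorem decode_chmod_mode_spec : Claim_equal_decode_chmod_mode := by
  intro mode _
  unfold Spec_decode_chmod_mode decode_chmod_mode decode_chmod_mode_alt
  simp only [List.foldl_cons, List.foldl_nil]
  rw [(by simp : mode >>> (0 : Nat) = mode)]
  rw [triad_eq, triad_eq, triad_eq]
  simp [String.append_assoc]
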